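-- pv_equiv track=rewrite | github.com/wh-jung0522/AlgorithmStudy | Programmers/Level3/25.Balloon.py | solution
-- ===== SOURCE A (Python) =====
-- def solution(a):
--     answer = 1
--     len_a = len(a)
--     left_index = 0
--     right_index = len_a-1
--     left_min = a[left_index]
--     right_min = a[right_index]
--     while left_index < right_index:
--         if left_min > right_min:
--             left_index += 1
--             left_value = a[left_index]
--             if left_value < left_min:
--                 answer += 1
--                 left_min = left_value
--         else:
--             right_index -= 1
--             right_value = a[right_index]
--             if right_value < right_min:
--                 answer += 1
--                 right_min = right_value
--
--     return answer
-- ===== SOURCE B (Python) =====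
-- def solution(a):
--     m = a[0]
--     prefix = 1
--     for x in a[1:]:
--         if x < m:
--             prefix += 1
--             m = x
--     m = a[-1]
--     suffix = 1
--     for x in reversed(a[:-1]):
--         if x < m:
--             suffix += 1
--             m = x
--     return prefix + suffix - 1
-- ===== Notes on version B (the rewrite author's own statement) =====
-- stated objective: idiomatic
-- what changed: Replaces A's single converging two-pointer scan (which interleaves both ends and maintains four loop variables) by two independent one-directional sweeps counting strict prefix minima and strict suffix minima, combined as prefix + suffix - 1.
import Mathlib
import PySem

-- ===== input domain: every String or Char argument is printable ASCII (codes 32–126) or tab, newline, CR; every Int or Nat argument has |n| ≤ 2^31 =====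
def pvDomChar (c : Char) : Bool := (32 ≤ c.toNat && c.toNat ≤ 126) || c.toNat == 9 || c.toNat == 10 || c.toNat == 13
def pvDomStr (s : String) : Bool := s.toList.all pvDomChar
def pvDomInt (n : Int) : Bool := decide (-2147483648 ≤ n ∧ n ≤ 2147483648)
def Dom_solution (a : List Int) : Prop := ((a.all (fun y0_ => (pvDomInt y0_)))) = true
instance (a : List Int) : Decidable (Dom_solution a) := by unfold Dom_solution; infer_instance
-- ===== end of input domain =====

-- B replaces A's converging two-pointer scan by two independent directional sweeps
-- (strict prefix minima + strict suffix minima - 1); alternative decomposition, same O(n) cost.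


-- ===== PORT A =====
-- the while loop; indices l, r stay inside [0, a.length) whenever the loop runs
-- (a ≠ [] by Pre_solution), so a.getD i 0 is exactly Python's a[i] here.
def solLoop (a : List Int) (l r : Nat) (lm rm ans : Int) : Int :=
  if _h : l < r then
    if lm > rm then
      let lv := a.getD (l + 1) 0
      if lv < lm then solLoop a (l + 1) r lv rm (ans + 1)
      else solLoop a (l + 1) r lm rm ans
    else
      let rv := a.getD (r - 1) 0
      if rv < rm then solLoop a l (r - 1) lm rv (ans + 1)
      else solLoop a l (r - 1) lm rm ans
  else ans
termination_by r - l

def solution (a : List Int) : Int :=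
  match a with
  | [] => 0  -- Python raises IndexError on a[0] here; excluded by Pre_solution
  | _ :: _ => solLoop a 0 (a.length - 1) (a.getD 0 0) (a.getD (a.length - 1) 0) 1

-- ===== PORT B =====
-- one strict-minima fold step, state = (running min, count)
def sweepStep (s : Int × Int) (y : Int) : Int × Int :=
  if y < s.1 then (y, s.2 + 1) else s

def solution_alt (a : List Int) : Int :=
  match a with
  | [] => 0  -- Python raises IndexError on a[0] here; excluded by Pre_solution
  | x :: _ =>
    let f := (a.drop 1).foldl sweepStep (x, (1 : Int))          -- for x in a[1:]
    let g := a.dropLast.reverse.foldl sweepStep (a.getLastD 0, (1 : Int))  -- for x in reversed(a[:-1])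
    f.2 + g.2 - 1

-- ===== PRECONDITION & SPEC =====
-- A raises IndexError on the empty list (a[0]); that is the only exclusion.
def Pre_solution (a : List Int) : Prop := a ≠ []
instance (a : List Int) : Decidable (Pre_solution a) := by unfold Pre_solution; infer_instance

def pvWitness_solution : List Int := [3, 1, 2]

def Spec_solution (a : List Int) (out : Int) : Prop := out = solution_alt a
instance (a : List Int) (out : Int) : Decidable (Spec_solution a out) := by unfold Spec_solution; infer_instance

-- ===== CLAIM (what is proved, stated in full; the proofs are below) =====
def Claim_equal_solution : Prop := ∀ (a : List Int), Dom_solution a → Pre_solution a → Spec_solution a (solution a)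

-- ===== LEMMAS AND PROOFS =====

-- count of strict running minima encountered scanning xs with initial minimum m
def fC : Int → List Int → Int
  | _, [] => 0
  | m, x :: xs => if x < m then 1 + fC x xs else fC m xs

-- min of m and all elements of xs
def lmin (m : Int) (xs : List Int) : Int := xs.foldl min m

-- "no strict running minimum below m anywhere in ys"
def NFc (m : Int) (ys : List Int) : Prop :=
  ∀ u x v, ys = u ++ x :: v → ¬ x < lmin m u

lemma lmin_cons (m x : Int) (u : List Int) : lmin m (x :: u) = lmin (min m x) u := rfl

lemma lmin_mono {m m' : Int} (h : m ≤ m') (u : List Int) : lmin m u ≤ lmin m' u := by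
  induction u generalizing m m' with
  | nil => exact h
  | cons y ys ih => exact ih (min_le_min_right y h)

lemma NFc_mono {m m' : Int} (h : m' ≤ m) {ys : List Int} (hn : NFc m ys) : NFc m' ys := by
  intro u x v he hx
  exact hn u x v he (lt_of_lt_of_le hx (lmin_mono h u))

lemma NFc_cons {m x : Int} {ys : List Int} (hx : ¬ x < m) (hn : NFc m ys) :
    NFc m (x :: ys) := by
  intro u z v he
  cases u with
  | nil =>
    simp only [List.nil_append, List.cons.injEq] at he
    simpa [lmin, he.1] using hx
  | cons y u' =>
    simp only [List.cons_append, List.cons.injEq] at he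
    obtain ⟨rfl, he⟩ := he
    rw [lmin_cons, min_eq_left (le_of_not_gt hx)]
    exact hn u' z v he

lemma NFc_tail {m x : Int} {ys : List Int} (hx : ¬ x < m) (hn : NFc m (x :: ys)) :
    NFc m ys := by
  intro u z v he
  have := hn (x :: u) z v (by simp [he])
  rwa [lmin_cons, min_eq_left (le_of_not_gt hx)] at this

lemma fC_zero {m : Int} {ys : List Int} (hn : NFc m ys) : fC m ys = 0 := by
  induction ys generalizing m with
  | nil => rfl
  | cons x xs ih =>
    have hx : ¬ x < m := by simpa [lmin] using hn [] x xs rfl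
    simp only [fC, if_neg hx]
    exact ih (NFc_tail hx hn)

lemma drop_cons_of_lt {a : List Int} {i : Nat} (h : i < a.length) :
    a.drop i = a.getD i 0 :: a.drop (i + 1) := by
  rw [List.drop_eq_getElem_cons h, List.getD_eq_getElem a 0 h]

lemma take_rev_cons {a : List Int} {i : Nat} (h : i < a.length) :
    (a.take (i + 1)).reverse = a.getD i 0 :: (a.take i).reverse := by
  rw [List.take_add_one, List.getElem?_eq_getElem h, List.getD_eq_getElem a 0 h]
  simp

-- main invariant lemma for A's loop
lemma solLoop_eq (a : List Int) (k : Nat) :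
    ∀ l r : Nat, ∀ lm rm ans : Int,
    r - l = k → l ≤ r → r < a.length →
    lm ≤ a.getD l 0 → rm ≤ a.getD r 0 →
    NFc lm (a.drop (r + 1)) → NFc rm ((a.take l).reverse) →
    solLoop a l r lm rm ans = ans + fC lm (a.drop (l + 1)) + fC rm ((a.take r).reverse) := by
  induction k with
  | zero =>
    intro l r lm rm ans hk hle hr hlm hrm hnf hnb
    have hlr : l = r := by omega
    subst hlr
    rw [solLoop, dif_neg (by omega)]
    rw [fC_zero hnf, fC_zero hnb]
    ring
  | succ k ih =>
    intro l r lm rm ans hk hle hr hlm hrm hnf hnb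
    have hlr : l < r := by omega
    rw [solLoop, dif_pos hlr]
    by_cases hc : lm > rm
    · rw [if_pos hc]
      have hl1 : l + 1 < a.length := by omega
      have hdrop : a.drop (l + 1) = a.getD (l + 1) 0 :: a.drop (l + 2) := drop_cons_of_lt hl1
      have hnb' : NFc rm ((a.take (l + 1)).reverse) := by
        rw [take_rev_cons (by omega : l < a.length)]
        exact NFc_cons (by exact not_lt.2 (le_of_lt (lt_of_lt_of_le hc hlm))) hnb
      by_cases hv : a.getD (l + 1) 0 < lm
      · rw [if_pos hv]
        rw [ih (l + 1) r (a.getD (l + 1) 0) rm (ans + 1) (by omega) (by omega) hr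
            le_rfl hrm (NFc_mono (le_of_lt hv) hnf) hnb']
        rw [hdrop, fC, if_pos hv]
        ring
      · rw [if_neg hv]
        rw [ih (l + 1) r lm rm ans (by omega) (by omega) hr (le_of_not_gt hv) hrm hnf hnb']
        rw [hdrop, fC, if_neg hv]
    · rw [if_neg hc]
      have hle' : lm ≤ rm := le_of_not_gt hc
      have hr1 : r - 1 < a.length := by omega
      have htake : (a.take r).reverse = a.getD (r - 1) 0 :: (a.take (r - 1)).reverse := by
        have : r = (r - 1) + 1 := by omega
        rw [this]; exact take_rev_cons (by omega)
      have hnf' : NFc lm (a.drop ((r - 1) + 1)) := by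
        have hre : (r - 1) + 1 = r := by omega
        rw [hre, drop_cons_of_lt (by omega : r < a.length)]
        exact NFc_cons (by exact not_lt.2 (le_trans hle' hrm)) hnf
      by_cases hv : a.getD (r - 1) 0 < rm
      · rw [if_pos hv]
        rw [ih l (r - 1) lm (a.getD (r - 1) 0) (ans + 1) (by omega) (by omega) hr1
            hlm le_rfl hnf' (NFc_mono (le_of_lt hv) hnb)]
        rw [htake, fC, if_pos hv]
        ring
      · rw [if_neg hv]
        rw [ih l (r - 1) lm rm ans (by omega) (by omega) hr1 hlm (le_of_not_gt hv) hnf' hnb]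
        rw [htake, fC, if_neg hv]

-- B's fold computes 1 + the strict-minima count fC
lemma foldl_sweepStep (xs : List Int) : ∀ m c : Int,
    (xs.foldl sweepStep (m, c)).2 = c + fC m xs := by
  induction xs with
  | nil => intro m c; simp [fC]
  | cons x xs ih =>
    intro m c
    by_cases hv : x < m
    · simp only [List.foldl_cons, sweepStep, if_pos hv, fC, ih]
      ring
    · simp only [List.foldl_cons, sweepStep, if_neg hv, fC, ih]

lemma NFc_nil (m : Int) : NFc m [] := by
  intro u x v he
  exact absurd he (by simp)

-- ===== VERDICT (by name: the statement is the Claim_ definition above) =====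
theorem solution_spec : Claim_equal_solution := by
  unfold Claim_equal_solution
  intro a _hdom hpre
  unfold Spec_solution
  match a with
  | [] => exact absurd rfl hpre
  | x :: t =>
    have hlen : (x :: t).length = t.length + 1 := rfl
    rw [solution, solution_alt]
    rw [foldl_sweepStep, foldl_sweepStep]
    have hdrop : (x :: t).drop 1 = t := rfl
    have hget0 : (x :: t).getD 0 0 = x := rfl
    have hloop : solLoop (x :: t) 0 ((x :: t).length - 1) ((x :: t).getD 0 0)
        ((x :: t).getD ((x :: t).length - 1) 0) 1 =
        1 + fC ((x :: t).getD 0 0) ((x :: t).drop 1)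
          + fC ((x :: t).getD ((x :: t).length - 1) 0) (((x :: t).take ((x :: t).length - 1)).reverse) := by
      apply solLoop_eq (x :: t) ((x :: t).length - 1) 0 ((x :: t).length - 1)
      · rfl
      · omega
      · simp [hlen]
      · rw [hget0]
      · exact le_rfl
      · have : (x :: t).drop ((x :: t).length - 1 + 1) = [] := by
          apply List.drop_eq_nil_of_le; omega
        rw [this]; exact NFc_nil _
      · simp only [List.take_zero, List.reverse_nil]; exact NFc_nil _
    rw [hloop]
    have hlast : (x :: t).getLastD 0 = (x :: t).getD ((x :: t).length - 1) 0 := by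
      rw [List.getLastD_eq_getLast?, List.getLast?_eq_getElem?,
          List.getD_eq_getElem?_getD]
    have hdl : (x :: t).dropLast.reverse = ((x :: t).take ((x :: t).length - 1)).reverse := by
      rw [List.dropLast_eq_take]
    rw [hlast, hdl, hget0, hdrop]
    ring
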